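-- pv_equiv track=rewrite | github.com/ljtijhuis/aoc_2024_py | src/day12.py | calc_fence_sides
-- ===== SOURCE A (Python) =====
-- def calc_fence_sides(cluster):
--     # find min and max row and col
--     min_row = 9999999999
--     max_row = 0
--     min_col = 9999999999
--     max_col = 0
--     for row, col in cluster:
--         min_row = min(min_row, row)
--         max_row = max(max_row, row)
--         min_col = min(min_col, col)
--         max_col = max(max_col, col)
--
--     # then go over each row and col in between to see how many pieces of fence are needed there
--
--     # for rows, we check the top side
--     distinct_fences = 0
--     for row in range(min_row, max_row+1):
--         running_fence = False
--         for col in range(min_col, max_col+1):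
--             # every time we have a cell where there is no cell above it, there needs to be a fence
--             if (row, col) in cluster and not (row-1, col) in cluster:
--                 # if the previous already was a fence, we do not count an extra
--                 if not running_fence:
--                     running_fence = True
--                     distinct_fences += 1
--             else:
--                 running_fence = False
--
--     # then the bottom sides
--     for row in range(min_row, max_row+1):
--         running_fence = False
--         for col in range(min_col, max_col+1):
--             if (row, col) in cluster and not (row+1, col) in cluster:
--                 if not running_fence:
--                     running_fence = True
--                     distinct_fences += 1
--             else:
--                 running_fence = False
--
--     # for columns, we check the left side
--     for col in range(min_col, max_col+1):
--         running_fence = False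
--         for row in range(min_row, max_row+1):
--             # every time we have a cell where there is no cell left of it, there needs to be a fence
--             if (row, col) in cluster and not (row, col-1) in cluster:
--                 # if the previous already was a fence, we do not count an extra
--                 if not running_fence:
--                     running_fence = True
--                     distinct_fences += 1
--             else:
--                 running_fence = False
--
--     # right side
--     for col in range(min_col, max_col+1):
--         running_fence = False
--         for row in range(min_row, max_row+1):
--             if (row, col) in cluster and not (row, col+1) in cluster:
--                 if not running_fence:
--                     running_fence = True
--                     distinct_fences += 1
--             else:
--                 running_fence = False
--
--     return distinct_fences
-- ===== SOURCE B (Python) =====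
-- def calc_fence_sides(cluster):
--     # Corner counting: a side "starts" at a cell exactly where A's scan starts a new run,
--     # so sides = number of such starts, found in one pass over the distinct cells.
--     cells = set(cluster)
--     sides = 0
--     for (r, c) in cells:
--         up = (r - 1, c) in cells
--         down = (r + 1, c) in cells
--         left = (r, c - 1) in cells
--         right = (r, c + 1) in cells
--         if not up and (not left or (r - 1, c - 1) in cells):
--             sides += 1  # a top side starts here
--         if not down and (not left or (r + 1, c - 1) in cells):
--             sides += 1  # a bottom side starts here
--         if not left and (not up or (r - 1, c - 1) in cells):
--             sides += 1  # a left side starts here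
--         if not right and (not up or (r - 1, c + 1) in cells):
--             sides += 1  # a right side starts here
--     return sides
-- ===== Notes on version B (the rewrite author's own statement) =====
-- stated objective: faster
-- what changed: B counts, in one pass over the distinct cells, the positions where each straight side starts (corner counting via the 2x2 neighborhood), instead of A's four raster scans over the whole bounding box tracking a running fence.
import Mathlib
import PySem

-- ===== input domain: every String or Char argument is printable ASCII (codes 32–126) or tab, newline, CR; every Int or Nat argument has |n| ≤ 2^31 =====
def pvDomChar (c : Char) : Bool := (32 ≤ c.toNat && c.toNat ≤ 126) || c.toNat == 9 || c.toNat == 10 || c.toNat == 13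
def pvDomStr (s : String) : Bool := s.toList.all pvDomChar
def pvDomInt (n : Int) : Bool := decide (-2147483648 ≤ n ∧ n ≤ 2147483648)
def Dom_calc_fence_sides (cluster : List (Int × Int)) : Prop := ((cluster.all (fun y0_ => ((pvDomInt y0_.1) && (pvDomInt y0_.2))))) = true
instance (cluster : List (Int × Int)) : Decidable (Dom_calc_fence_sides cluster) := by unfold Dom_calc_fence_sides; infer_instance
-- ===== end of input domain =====

-- B replaces A's four bounding-box raster scans with one pass over the distinct cells that
-- counts where each straight side starts (corner counting) — faster on sparse clusters.

-- ===== PORT A =====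
-- inner scan of one row/column: counts distinct runs of P (the repeated
-- 'running_fence' loop body shared by A's four copy-pasted loops)
def pvScan (P : Int → Bool) (idxs : List Int) (acc : Int) : Int :=
  (idxs.foldl
    (fun (st : Bool × Int) i =>
      if P i then (if !st.1 then (true, st.2 + 1) else st) else (false, st.2))
    (false, acc)).2

def calc_fence_sides (cluster : List (Int × Int)) : Int :=
  let b := cluster.foldl
      (fun (b : Int × Int × Int × Int) rc =>
        (min b.1 rc.1, max b.2.1 rc.1, min b.2.2.1 rc.2, max b.2.2.2 rc.2))
      (9999999999, 0, 9999999999, 0)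
  let minRow := b.1
  let maxRow := b.2.1
  let minCol := b.2.2.1
  let maxCol := b.2.2.2
  let rows := PySem.List.pyRange minRow (maxRow + 1) 1
  let cols := PySem.List.pyRange minCol (maxCol + 1) 1
  -- top sides
  let d1 := rows.foldl (fun acc row =>
      pvScan (fun col => cluster.contains (row, col) && !cluster.contains (row - 1, col)) cols acc) 0
  -- bottom sides
  let d2 := rows.foldl (fun acc row =>
      pvScan (fun col => cluster.contains (row, col) && !cluster.contains (row + 1, col)) cols acc) d1
  -- left sides
  let d3 := cols.foldl (fun acc col =>
      pvScan (fun row => cluster.contains (row, col) && !cluster.contains (row, col - 1)) rows acc) d2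
  -- right sides
  let d4 := cols.foldl (fun acc col =>
      pvScan (fun row => cluster.contains (row, col) && !cluster.contains (row, col + 1)) rows acc) d3
  d4

-- ===== PORT B =====
def calc_fence_sides_alt (cluster : List (Int × Int)) : Int :=
  let cells : PySem.Set (Int × Int) := PySem.Set.ofList cluster
  cells.foldl
    (fun sides p =>
      let r := p.1
      let c := p.2
      let up := PySem.Set.contains cells (r - 1, c)
      let down := PySem.Set.contains cells (r + 1, c)
      let left := PySem.Set.contains cells (r, c - 1)
      let right := PySem.Set.contains cells (r, c + 1)
      let s1 := if !up && (!left || PySem.Set.contains cells (r - 1, c - 1)) then sides + 1 else sides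
      let s2 := if !down && (!left || PySem.Set.contains cells (r + 1, c - 1)) then s1 + 1 else s1
      let s3 := if !left && (!up || PySem.Set.contains cells (r - 1, c - 1)) then s2 + 1 else s2
      let s4 := if !right && (!up || PySem.Set.contains cells (r - 1, c + 1)) then s3 + 1 else s3
      s4)
    0

-- ===== PRECONDITION & SPEC =====
def Spec_calc_fence_sides (cluster : List (Int × Int)) (out : Int) : Prop := out = calc_fence_sides_alt cluster
instance (cluster : List (Int × Int)) (out : Int) : Decidable (Spec_calc_fence_sides cluster out) := by unfold Spec_calc_fence_sides; infer_instance

-- ===== CLAIM (what is proved, stated in full; the proofs are below) =====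
def Claim_equal_calc_fence_sides : Prop := ∀ (cluster : List (Int × Int)), Dom_calc_fence_sides cluster → Spec_calc_fence_sides cluster (calc_fence_sides cluster)

-- ===== LEMMAS AND PROOFS =====

-- "side-start" predicates (top/bottom/left/right), over a membership function M
def pvT (M : Int × Int → Bool) (p : Int × Int) : Bool :=
  M p && !M (p.1 - 1, p.2) && !(M (p.1, p.2 - 1) && !M (p.1 - 1, p.2 - 1))
def pvB (M : Int × Int → Bool) (p : Int × Int) : Bool :=
  M p && !M (p.1 + 1, p.2) && !(M (p.1, p.2 - 1) && !M (p.1 + 1, p.2 - 1))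
def pvL (M : Int × Int → Bool) (p : Int × Int) : Bool :=
  M p && !M (p.1, p.2 - 1) && !(M (p.1 - 1, p.2) && !M (p.1 - 1, p.2 - 1))
def pvR (M : Int × Int → Bool) (p : Int × Int) : Bool :=
  M p && !M (p.1, p.2 + 1) && !(M (p.1 - 1, p.2) && !M (p.1 - 1, p.2 + 1))

-- proof-only names for A's bounding box and its row/column ranges
def pvBnd (cluster : List (Int × Int)) : Int × Int × Int × Int :=
  cluster.foldl
    (fun (b : Int × Int × Int × Int) rc =>
      (min b.1 rc.1, max b.2.1 rc.1, min b.2.2.1 rc.2, max b.2.2.2 rc.2))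
    (9999999999, 0, 9999999999, 0)
def pvRows (cluster : List (Int × Int)) : List Int :=
  PySem.List.pyRange (pvBnd cluster).1 ((pvBnd cluster).2.1 + 1) 1
def pvCols (cluster : List (Int × Int)) : List Int :=
  PySem.List.pyRange (pvBnd cluster).2.2.1 ((pvBnd cluster).2.2.2 + 1) 1

-- the run-counting scan counts run starts
theorem pvScan_aux (P : Int → Bool) :
    ∀ (n : Nat) (lo : Int) (acc : Int),
      ((PySem.List.pyRange lo (lo + n) 1).foldl
        (fun (st : Bool × Int) i =>
          if P i then (if !st.1 then (true, st.2 + 1) else st) else (false, st.2))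
        (P (lo - 1), acc)).2
      = acc + ((PySem.List.pyRange lo (lo + n) 1).countP (fun i => P i && !P (i - 1)) : Int) := by
  intro n
  induction n with
  | zero =>
    intro lo acc
    simp
  | succ n ih =>
    intro lo acc
    have hlt : lo < lo + ((n+1 : Nat) : Int) := by push_cast; omega
    rw [PySem.List.pyRange_one_cons hlt]
    have hre : lo + ((n+1 : Nat) : Int) = (lo + 1) + (n : Int) := by push_cast; ring
    rw [List.foldl_cons, List.countP_cons, hre]
    have hstep : ∀ b : Bool, ∀ a : Int,
        (if P lo then (if !(b, a).1 then (true, (b, a).2 + 1) else (b, a)) else (false, (b, a).2))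
          = (P lo, if P lo && !b then a + 1 else a) := by
      intro b a
      cases hb : P lo <;> cases b <;> simp
    rw [hstep (P (lo - 1)) acc]
    have hl1 : lo + 1 - 1 = lo := by ring
    have := ih (lo + 1) (if P lo && !P (lo - 1) then acc + 1 else acc)
    rw [hl1] at this
    rw [this]
    cases hc : (P lo && !P (lo - 1)) <;> simp <;> ring

theorem pvScan_eq (P : Int → Bool) (lo hi : Int) (acc : Int) (hP : P (lo - 1) = false) :
    pvScan P (PySem.List.pyRange lo hi 1) acc
      = acc + ((PySem.List.pyRange lo hi 1).countP (fun i => P i && !P (i - 1)) : Int) := by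
  by_cases h : hi ≤ lo
  · rw [PySem.List.pyRange_one_eq_nil h]; simp [pvScan]
  · have hn : hi = lo + ((hi - lo).toNat : Int) := by omega
    rw [hn, pvScan]
    have hinit : ((false : Bool), acc) = (P (lo - 1), acc) := by rw [hP]
    rw [hinit]
    exact pvScan_aux P (hi - lo).toNat lo acc

-- countP of one predicate over two nodup lists that agree on the relevant members
theorem pvCountP_eq_of_nodup {α : Type} (p : α → Bool) {l₁ l₂ : List α}
    (h₁ : l₁.Nodup) (h₂ : l₂.Nodup) (h : ∀ x, p x = true → (x ∈ l₁ ↔ x ∈ l₂)) :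
    l₁.countP p = l₂.countP p := by
  rw [List.countP_eq_length_filter, List.countP_eq_length_filter]
  apply List.Perm.length_eq
  rw [List.perm_ext_iff_of_nodup (h₁.filter p) (h₂.filter p)]
  intro a
  simp only [List.mem_filter]
  constructor
  · rintro ⟨ha, hp⟩; exact ⟨(h a hp).mp ha, hp⟩
  · rintro ⟨ha, hp⟩; exact ⟨(h a hp).mpr ha, hp⟩

-- outer loop adding per-line counts equals one countP over the rectangle
theorem pvFoldl_add_countP {α β γ : Type} (outer : List α) (inner : List β)
    (mk : α → β → γ) (q : γ → Bool) (a : Int) :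
    outer.foldl (fun acc x => acc + ((inner.countP (fun y => q (mk x y))) : Int)) a
      = a + (((outer.flatMap (fun x => inner.map (mk x))).countP q) : Int) := by
  induction outer generalizing a with
  | nil => simp
  | cons x xs ih =>
    rw [List.foldl_cons, ih, List.flatMap_cons, List.countP_append, List.countP_map]
    have : (q ∘ mk x) = fun y => q (mk x y) := rfl
    rw [this]
    push_cast; ring

theorem pvNodup_flatMap_map {α β γ : Type} (outer : List α) (inner : List β)
    (mk : α → β → γ) (hinj : ∀ a b a' b', mk a b = mk a' b' → a = a' ∧ b = b')
    (h1 : outer.Nodup) (h2 : inner.Nodup) :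
    (outer.flatMap (fun x => inner.map (mk x))).Nodup := by
  rw [List.nodup_flatMap]
  constructor
  · intro x _
    exact h2.map (fun b b' hbb => (hinj x b x b' hbb).2)
  · apply h1.imp
    intro a b hab z hz1 hz2
    simp only [List.mem_map] at hz1 hz2
    obtain ⟨y1, _, rfl⟩ := hz1
    obtain ⟨y2, _, he⟩ := hz2
    exact hab (hinj _ _ _ _ he.symm).1

-- the bounds fold bounds every member of the list
theorem pvBounds_spec (cluster : List (Int × Int)) :
    ∀ (init : Int × Int × Int × Int) (p : Int × Int), p ∈ cluster →
      let r := cluster.foldl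
        (fun (b : Int × Int × Int × Int) rc =>
          (min b.1 rc.1, max b.2.1 rc.1, min b.2.2.1 rc.2, max b.2.2.2 rc.2)) init
      r.1 ≤ p.1 ∧ p.1 ≤ r.2.1 ∧ r.2.2.1 ≤ p.2 ∧ p.2 ≤ r.2.2.2 := by
  have hmono : ∀ (l : List (Int × Int)) (init : Int × Int × Int × Int),
      let r := l.foldl
        (fun (b : Int × Int × Int × Int) rc =>
          (min b.1 rc.1, max b.2.1 rc.1, min b.2.2.1 rc.2, max b.2.2.2 rc.2)) init
      r.1 ≤ init.1 ∧ init.2.1 ≤ r.2.1 ∧ r.2.2.1 ≤ init.2.2.1 ∧ init.2.2.2 ≤ r.2.2.2 := by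
    intro l
    induction l with
    | nil => intro init; simp
    | cons x xs ih =>
      intro init
      have h := ih (min init.1 x.1, max init.2.1 x.1, min init.2.2.1 x.2, max init.2.2.2 x.2)
      simp only [List.foldl_cons]
      refine ⟨le_trans h.1 ?_, le_trans ?_ h.2.1, le_trans h.2.2.1 ?_, le_trans ?_ h.2.2.2⟩
        <;> simp
  induction cluster with
  | nil => intro _ _ h; simp at h
  | cons x xs ih =>
    intro init p hp
    rcases List.mem_cons.mp hp with rfl | hp
    · have h := hmono xs (min init.1 p.1, max init.2.1 p.1, min init.2.2.1 p.2, max init.2.2.2 p.2)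
      simp only [List.foldl_cons]
      refine ⟨le_trans h.1 ?_, le_trans ?_ h.2.1, le_trans h.2.2.1 ?_, le_trans ?_ h.2.2.2⟩
        <;> simp
    · exact ih _ p hp

theorem pvContains_ofList (cluster : List (Int × Int)) (q : Int × Int) :
    PySem.Set.contains (PySem.Set.ofList cluster) q = cluster.contains q := by
  simp only [PySem.Set.contains_eq_listContains]
  rw [Bool.eq_iff_iff]
  simp only [List.contains_iff_mem, PySem.Set.mem_ofList]

-- B's fold totals the four side-start counts over the distinct cells
theorem pvAlt_eq_counts (cluster : List (Int × Int)) :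
    calc_fence_sides_alt cluster
      = (((PySem.Set.ofList cluster).countP (pvT (fun q => cluster.contains q))) : Int)
      + (((PySem.Set.ofList cluster).countP (pvB (fun q => cluster.contains q))) : Int)
      + (((PySem.Set.ofList cluster).countP (pvL (fun q => cluster.contains q))) : Int)
      + (((PySem.Set.ofList cluster).countP (pvR (fun q => cluster.contains q))) : Int) := by
  set M : Int × Int → Bool := fun q => cluster.contains q with hM
  set cells := PySem.Set.ofList cluster with hcells
  have hc : ∀ q, PySem.Set.contains cells q = M q := fun q => pvContains_ofList cluster q
  have hstep : (fun (sides : Int) (p : Int × Int) =>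
      let r := p.1
      let c := p.2
      let up := PySem.Set.contains cells (r - 1, c)
      let down := PySem.Set.contains cells (r + 1, c)
      let left := PySem.Set.contains cells (r, c - 1)
      let right := PySem.Set.contains cells (r, c + 1)
      let s1 := if !up && (!left || PySem.Set.contains cells (r - 1, c - 1)) then sides + 1 else sides
      let s2 := if !down && (!left || PySem.Set.contains cells (r + 1, c - 1)) then s1 + 1 else s1
      let s3 := if !left && (!up || PySem.Set.contains cells (r - 1, c - 1)) then s2 + 1 else s2
      let s4 := if !right && (!up || PySem.Set.contains cells (r - 1, c + 1)) then s3 + 1 else s3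
      s4)
    = fun (sides : Int) (p : Int × Int) => sides +
        ((if (!M (p.1 - 1, p.2) && (!M (p.1, p.2 - 1) || M (p.1 - 1, p.2 - 1)) : Bool) then (1:Int) else 0)
        + ((if (!M (p.1 + 1, p.2) && (!M (p.1, p.2 - 1) || M (p.1 + 1, p.2 - 1)) : Bool) then (1:Int) else 0)
        + ((if (!M (p.1, p.2 - 1) && (!M (p.1 - 1, p.2) || M (p.1 - 1, p.2 - 1)) : Bool) then (1:Int) else 0)
        + (if (!M (p.1, p.2 + 1) && (!M (p.1 - 1, p.2) || M (p.1 - 1, p.2 + 1)) : Bool) then (1:Int) else 0)))) := by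
    funext sides p
    simp only [hc]
    split_ifs <;> ring
  show List.foldl _ 0 cells = _
  rw [hstep, PySem.List.foldl_add cells _ 0]
  rw [PySem.List.sum_map_add_int cells
    (fun p => if (!M (p.1 - 1, p.2) && (!M (p.1, p.2 - 1) || M (p.1 - 1, p.2 - 1)) : Bool) then (1:Int) else 0)]
  rw [PySem.List.sum_map_add_int cells
    (fun p => if (!M (p.1 + 1, p.2) && (!M (p.1, p.2 - 1) || M (p.1 + 1, p.2 - 1)) : Bool) then (1:Int) else 0)]
  rw [PySem.List.sum_map_add_int cells
    (fun p => if (!M (p.1, p.2 - 1) && (!M (p.1 - 1, p.2) || M (p.1 - 1, p.2 - 1)) : Bool) then (1:Int) else 0)]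
  rw [PySem.List.sum_map_ite_one_zero (fun p => (!M (p.1 - 1, p.2) && (!M (p.1, p.2 - 1) || M (p.1 - 1, p.2 - 1)) : Bool)) cells]
  rw [PySem.List.sum_map_ite_one_zero (fun p => (!M (p.1 + 1, p.2) && (!M (p.1, p.2 - 1) || M (p.1 + 1, p.2 - 1)) : Bool)) cells]
  rw [PySem.List.sum_map_ite_one_zero (fun p => (!M (p.1, p.2 - 1) && (!M (p.1 - 1, p.2) || M (p.1 - 1, p.2 - 1)) : Bool)) cells]
  rw [PySem.List.sum_map_ite_one_zero (fun p => (!M (p.1, p.2 + 1) && (!M (p.1 - 1, p.2) || M (p.1 - 1, p.2 + 1)) : Bool)) cells]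
  have hmem : ∀ p ∈ cells, M p = true := by
    intro p hp
    exact List.elem_eq_true_of_mem ((PySem.Set.mem_ofList _ _).mp hp)
  have e1 : cells.countP (fun p => (!M (p.1 - 1, p.2) && (!M (p.1, p.2 - 1) || M (p.1 - 1, p.2 - 1)) : Bool))
      = cells.countP (pvT M) := by
    apply List.countP_congr
    intro p hp
    simp only [pvT, hmem p hp]
    cases h1 : M (p.1 - 1, p.2) <;> cases h2 : M (p.1, p.2 - 1) <;> cases h3 : M (p.1 - 1, p.2 - 1) <;> simp
  have e2 : cells.countP (fun p => (!M (p.1 + 1, p.2) && (!M (p.1, p.2 - 1) || M (p.1 + 1, p.2 - 1)) : Bool))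
      = cells.countP (pvB M) := by
    apply List.countP_congr
    intro p hp
    simp only [pvB, hmem p hp]
    cases h1 : M (p.1 + 1, p.2) <;> cases h2 : M (p.1, p.2 - 1) <;> cases h3 : M (p.1 + 1, p.2 - 1) <;> simp
  have e3 : cells.countP (fun p => (!M (p.1, p.2 - 1) && (!M (p.1 - 1, p.2) || M (p.1 - 1, p.2 - 1)) : Bool))
      = cells.countP (pvL M) := by
    apply List.countP_congr
    intro p hp
    simp only [pvL, hmem p hp]
    cases h1 : M (p.1, p.2 - 1) <;> cases h2 : M (p.1 - 1, p.2) <;> cases h3 : M (p.1 - 1, p.2 - 1) <;> simp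
  have e4 : cells.countP (fun p => (!M (p.1, p.2 + 1) && (!M (p.1 - 1, p.2) || M (p.1 - 1, p.2 + 1)) : Bool))
      = cells.countP (pvR M) := by
    apply List.countP_congr
    intro p hp
    simp only [pvR, hmem p hp]
    cases h1 : M (p.1, p.2 + 1) <;> cases h2 : M (p.1 - 1, p.2) <;> cases h3 : M (p.1 - 1, p.2 + 1) <;> simp
  rw [e1, e2, e3, e4]
  ring

-- A's four scans total the same four side-start counts
theorem pvA_eq_counts (cluster : List (Int × Int)) :
    calc_fence_sides cluster
      = (((PySem.Set.ofList cluster).countP (pvT (fun q => cluster.contains q))) : Int)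
      + (((PySem.Set.ofList cluster).countP (pvB (fun q => cluster.contains q))) : Int)
      + (((PySem.Set.ofList cluster).countP (pvL (fun q => cluster.contains q))) : Int)
      + (((PySem.Set.ofList cluster).countP (pvR (fun q => cluster.contains q))) : Int) := by
  set M : Int × Int → Bool := fun q => cluster.contains q with hM
  have hb : ∀ p ∈ cluster, (pvBnd cluster).1 ≤ p.1 ∧ p.1 ≤ (pvBnd cluster).2.1
      ∧ (pvBnd cluster).2.2.1 ≤ p.2 ∧ p.2 ≤ (pvBnd cluster).2.2.2 :=
    fun p hp => pvBounds_spec cluster _ p hp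
  have hMmem : ∀ q : Int × Int, M q = true → q ∈ cluster := by
    intro q hq
    exact List.contains_iff_mem.mp hq
  have hMrowlow : ∀ r c : Int, r < (pvBnd cluster).1 → M (r, c) = false := by
    intro r c h
    cases hq : M (r, c) with
    | false => rfl
    | true => exact absurd ((hb _ (hMmem _ hq)).1) (by simpa using h.not_ge)
  have hMcollow : ∀ r c : Int, c < (pvBnd cluster).2.2.1 → M (r, c) = false := by
    intro r c h
    cases hq : M (r, c) with
    | false => rfl
    | true => exact absurd ((hb _ (hMmem _ hq)).2.2.1) (by simpa using h.not_ge)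
  -- the definition, named
  have hdef : calc_fence_sides cluster =
      (pvCols cluster).foldl (fun acc col =>
        pvScan (fun row => M (row, col) && !M (row, col + 1)) (pvRows cluster) acc)
      ((pvCols cluster).foldl (fun acc col =>
        pvScan (fun row => M (row, col) && !M (row, col - 1)) (pvRows cluster) acc)
      ((pvRows cluster).foldl (fun acc row =>
        pvScan (fun col => M (row, col) && !M (row + 1, col)) (pvCols cluster) acc)
      ((pvRows cluster).foldl (fun acc row =>
        pvScan (fun col => M (row, col) && !M (row - 1, col)) (pvCols cluster) acc) 0))) := rfl
  rw [hdef]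
  -- rewrite each inner scan as a per-line count of side starts
  have L1 : ∀ a, (pvRows cluster).foldl (fun acc row =>
      pvScan (fun col => M (row, col) && !M (row - 1, col)) (pvCols cluster) acc) a
      = a + ((((pvRows cluster).flatMap (fun r => (pvCols cluster).map (fun c => (r, c)))).countP (pvT M)) : Int) := by
    intro a
    rw [PySem.List.foldl_congr_mem _ _
      (fun acc row => acc + (((pvCols cluster).countP (fun c => pvT M (row, c))) : Int)) a
      (by
        intro acc row _
        exact pvScan_eq _ _ _ acc (by
          simp only [Bool.and_eq_false_iff]
          exact Or.inl (hMcollow row _ (by omega))))]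
    exact pvFoldl_add_countP (pvRows cluster) (pvCols cluster) (fun r c => (r, c)) (pvT M) a
  have L2 : ∀ a, (pvRows cluster).foldl (fun acc row =>
      pvScan (fun col => M (row, col) && !M (row + 1, col)) (pvCols cluster) acc) a
      = a + ((((pvRows cluster).flatMap (fun r => (pvCols cluster).map (fun c => (r, c)))).countP (pvB M)) : Int) := by
    intro a
    rw [PySem.List.foldl_congr_mem _ _
      (fun acc row => acc + (((pvCols cluster).countP (fun c => pvB M (row, c))) : Int)) a
      (by
        intro acc row _
        exact pvScan_eq _ _ _ acc (by
          simp only [Bool.and_eq_false_iff]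
          exact Or.inl (hMcollow row _ (by omega))))]
    exact pvFoldl_add_countP (pvRows cluster) (pvCols cluster) (fun r c => (r, c)) (pvB M) a
  have L3 : ∀ a, (pvCols cluster).foldl (fun acc col =>
      pvScan (fun row => M (row, col) && !M (row, col - 1)) (pvRows cluster) acc) a
      = a + ((((pvCols cluster).flatMap (fun c => (pvRows cluster).map (fun r => (r, c)))).countP (pvL M)) : Int) := by
    intro a
    rw [PySem.List.foldl_congr_mem _ _
      (fun acc col => acc + (((pvRows cluster).countP (fun r => pvL M (r, col))) : Int)) a
      (by
        intro acc col _
        exact pvScan_eq _ _ _ acc (by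
          simp only [Bool.and_eq_false_iff]
          exact Or.inl (hMrowlow _ col (by omega))))]
    exact pvFoldl_add_countP (pvCols cluster) (pvRows cluster) (fun c r => (r, c)) (pvL M) a
  have L4 : ∀ a, (pvCols cluster).foldl (fun acc col =>
      pvScan (fun row => M (row, col) && !M (row, col + 1)) (pvRows cluster) acc) a
      = a + ((((pvCols cluster).flatMap (fun c => (pvRows cluster).map (fun r => (r, c)))).countP (pvR M)) : Int) := by
    intro a
    rw [PySem.List.foldl_congr_mem _ _
      (fun acc col => acc + (((pvRows cluster).countP (fun r => pvR M (r, col))) : Int)) a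
      (by
        intro acc col _
        exact pvScan_eq _ _ _ acc (by
          simp only [Bool.and_eq_false_iff]
          exact Or.inl (hMrowlow _ col (by omega))))]
    exact pvFoldl_add_countP (pvCols cluster) (pvRows cluster) (fun c r => (r, c)) (pvR M) a
  rw [L1, L2, L3, L4]
  -- bridge each rectangle count to a count over the distinct cells
  have hg1nodup : ((pvRows cluster).flatMap (fun r => (pvCols cluster).map (fun c => (r, c)))).Nodup :=
    pvNodup_flatMap_map _ _ _ (fun a b a' b' h => by simpa [Prod.ext_iff] using h)
      (PySem.List.nodup_pyRange_one _ _) (PySem.List.nodup_pyRange_one _ _)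
  have hg2nodup : ((pvCols cluster).flatMap (fun c => (pvRows cluster).map (fun r => (r, c)))).Nodup :=
    pvNodup_flatMap_map _ _ _ (fun a b a' b' h => by
        simp only [Prod.ext_iff] at h; exact ⟨h.2, h.1⟩)
      (PySem.List.nodup_pyRange_one _ _) (PySem.List.nodup_pyRange_one _ _)
  have hg1mem : ∀ x : Int × Int, x ∈ cluster →
      x ∈ (pvRows cluster).flatMap (fun r => (pvCols cluster).map (fun c => (r, c))) := by
    intro x hx
    have h := hb x hx
    simp only [List.mem_flatMap, List.mem_map]
    exact ⟨x.1, PySem.List.mem_pyRange_one.mpr ⟨h.1, by omega⟩,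
      ⟨x.2, PySem.List.mem_pyRange_one.mpr ⟨h.2.2.1, by omega⟩, rfl⟩⟩
  have hg2mem : ∀ x : Int × Int, x ∈ cluster →
      x ∈ (pvCols cluster).flatMap (fun c => (pvRows cluster).map (fun r => (r, c))) := by
    intro x hx
    have h := hb x hx
    simp only [List.mem_flatMap, List.mem_map]
    exact ⟨x.2, PySem.List.mem_pyRange_one.mpr ⟨h.2.2.1, by omega⟩,
      ⟨x.1, PySem.List.mem_pyRange_one.mpr ⟨h.1, by omega⟩, rfl⟩⟩
  have hcnt : ∀ (p : Int × Int → Bool) (g : List (Int × Int)), g.Nodup →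
      (∀ x : Int × Int, x ∈ cluster → x ∈ g) →
      (∀ x : Int × Int, p x = true → x ∈ cluster) →
      g.countP p = (PySem.Set.ofList cluster).countP p := by
    intro p g hg hmemg hp
    apply pvCountP_eq_of_nodup p hg (PySem.Set.nodup_ofList cluster)
    intro x hx
    constructor
    · intro _; exact (PySem.Set.mem_ofList _ _).mpr (hp x hx)
    · intro _; exact hmemg x (hp x hx)
  have hpT : ∀ x : Int × Int, pvT M x = true → x ∈ cluster := by
    intro x hx
    simp only [pvT, Bool.and_eq_true] at hx
    exact hMmem x hx.1.1
  have hpB : ∀ x : Int × Int, pvB M x = true → x ∈ cluster := by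
    intro x hx
    simp only [pvB, Bool.and_eq_true] at hx
    exact hMmem x hx.1.1
  have hpL : ∀ x : Int × Int, pvL M x = true → x ∈ cluster := by
    intro x hx
    simp only [pvL, Bool.and_eq_true] at hx
    exact hMmem x hx.1.1
  have hpR : ∀ x : Int × Int, pvR M x = true → x ∈ cluster := by
    intro x hx
    simp only [pvR, Bool.and_eq_true] at hx
    exact hMmem x hx.1.1
  rw [hcnt (pvT M) _ hg1nodup hg1mem hpT, hcnt (pvB M) _ hg1nodup hg1mem hpB,
      hcnt (pvL M) _ hg2nodup hg2mem hpL, hcnt (pvR M) _ hg2nodup hg2mem hpR]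
  ring

-- ===== VERDICT (by name: the statement is the Claim_ definition above) =====
theorem calc_fence_sides_spec : Claim_equal_calc_fence_sides := by
  intro cluster _
  unfold Spec_calc_fence_sides
  rw [pvA_eq_counts, pvAlt_eq_counts]
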